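-- pv_equiv track=rewrite | github.com/KaleemRazaSyed/CP-trainer | agent.py | llm_reason
-- ===== SOURCE A (Python) =====
-- def llm_reason(user_input):
--     text = user_input.lower()
--
--     scores = {
--         "explain": 0,
--         "plan": 0,
--         "review": 0,
--         "problem": 0
--     }
--
--     if any(word in text for word in ["explain", "understand", "teach", "concept"]):
--         scores["explain"] += 2
--
--     if any(word in text for word in ["plan", "study", "schedule", "today", "prepare"]):
--         scores["plan"] += 2
--
--     if any(word in text for word in ["review", "progress", "weak", "mistakes"]):
--         scores["review"] += 2
--
--     if any(word in text for word in ["problem", "question", "practice", "solve"]):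
--         scores["problem"] += 2
--
--     return max(scores, key=scores.get)
-- ===== SOURCE B (Python) =====
-- CATEGORIES = [
--     ("explain", ["explain", "understand", "teach", "concept"]),
--     ("plan", ["plan", "study", "schedule", "today", "prepare"]),
--     ("review", ["review", "progress", "weak", "mistakes"]),
--     ("problem", ["problem", "question", "practice", "solve"]),
-- ]
--
--
-- def llm_reason(user_input):
--     text = user_input.lower()
--     for category, keywords in CATEGORIES:
--         if any(word in text for word in keywords):
--             return category
--     return "explain"
-- ===== Notes on version B (the rewrite author's own statement) =====
-- stated objective: simpler
-- what changed: Replaced the score dict plus max(key=scores.get) with an ordered early-return scan over (category, keywords) pairs, returning the first matching category, or the first category as fallback when none match (the same value max picks, since every matched category scores 2 and max takes the first maximum).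
import Mathlib
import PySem

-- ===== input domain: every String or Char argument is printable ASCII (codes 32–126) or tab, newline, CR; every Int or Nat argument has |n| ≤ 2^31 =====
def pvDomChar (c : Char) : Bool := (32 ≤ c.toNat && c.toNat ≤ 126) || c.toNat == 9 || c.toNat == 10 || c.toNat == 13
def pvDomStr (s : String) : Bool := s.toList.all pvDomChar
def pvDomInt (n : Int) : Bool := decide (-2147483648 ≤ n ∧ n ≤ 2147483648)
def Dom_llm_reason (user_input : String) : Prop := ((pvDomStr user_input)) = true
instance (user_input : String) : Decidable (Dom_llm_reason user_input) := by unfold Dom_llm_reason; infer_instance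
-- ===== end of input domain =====

-- B replaces A's score dict + max(key=scores.get) by an ordered early-return scan over (category, keywords) pairs: simpler decomposition, same behaviour.


-- ===== PORT A =====
def llm_reason (user_input : String) : String :=
  let text := PySem.Str.lower user_input
  let scores : PySem.Dict String Int :=
    (((PySem.Dict.empty.insert "explain" 0).insert "plan" 0).insert "review" 0).insert "problem" 0
  let scores :=
    if (["explain", "understand", "teach", "concept"]).any (fun word => PySem.Str.isIn word text)
    then scores.modify "explain" 0 (· + 2) else scores
  let scores :=
    if (["plan", "study", "schedule", "today", "prepare"]).any (fun word => PySem.Str.isIn word text)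
    then scores.modify "plan" 0 (· + 2) else scores
  let scores :=
    if (["review", "progress", "weak", "mistakes"]).any (fun word => PySem.Str.isIn word text)
    then scores.modify "review" 0 (· + 2) else scores
  let scores :=
    if (["problem", "question", "practice", "solve"]).any (fun word => PySem.Str.isIn word text)
    then scores.modify "problem" 0 (· + 2) else scores
  -- max(scores, key=scores.get): first key with maximal score (dict is nonempty, so the default is never used)
  PySem.List.maxD scores.keys (fun k => scores.getD k 0) ""

-- ===== PORT B =====
def llm_reason_categories : List (String × List String) :=
  [("explain", ["explain", "understand", "teach", "concept"]),
   ("plan", ["plan", "study", "schedule", "today", "prepare"]),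
   ("review", ["review", "progress", "weak", "mistakes"]),
   ("problem", ["problem", "question", "practice", "solve"])]

def llm_reason_scan (text : String) : List (String × List String) → String
  | [] => "explain"
  | (category, keywords) :: rest =>
      if keywords.any (fun word => PySem.Str.isIn word text) then category
      else llm_reason_scan text rest

def llm_reason_alt (user_input : String) : String :=
  llm_reason_scan (PySem.Str.lower user_input) llm_reason_categories

-- ===== PRECONDITION & SPEC =====
def Spec_llm_reason (user_input : String) (out : String) : Prop := out = llm_reason_alt user_input
instance (user_input : String) (out : String) : Decidable (Spec_llm_reason user_input out) := by unfold Spec_llm_reason; infer_instance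

-- ===== CLAIM (what is proved, stated in full; the proofs are below) =====
def Claim_equal_llm_reason : Prop := ∀ (user_input : String), Dom_llm_reason user_input → Spec_llm_reason user_input (llm_reason user_input)

-- ===== LEMMAS AND PROOFS =====
theorem llm_reason_core (t : String) :
    (let scores : PySem.Dict String Int :=
      (((PySem.Dict.empty.insert "explain" 0).insert "plan" 0).insert "review" 0).insert "problem" 0
     let scores :=
       if (["explain", "understand", "teach", "concept"]).any (fun word => PySem.Str.isIn word t)
       then scores.modify "explain" 0 (· + 2) else scores
     let scores :=
       if (["plan", "study", "schedule", "today", "prepare"]).any (fun word => PySem.Str.isIn word t)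
       then scores.modify "plan" 0 (· + 2) else scores
     let scores :=
       if (["review", "progress", "weak", "mistakes"]).any (fun word => PySem.Str.isIn word t)
       then scores.modify "review" 0 (· + 2) else scores
     let scores :=
       if (["problem", "question", "practice", "solve"]).any (fun word => PySem.Str.isIn word t)
       then scores.modify "problem" 0 (· + 2) else scores
     PySem.List.maxD scores.keys (fun k => scores.getD k 0) "")
    = llm_reason_scan t llm_reason_categories := by
  simp only [llm_reason_categories, llm_reason_scan]
  cases h1 : (["explain", "understand", "teach", "concept"]).any (fun word => PySem.Str.isIn word t) <;>
  cases h2 : (["plan", "study", "schedule", "today", "prepare"]).any (fun word => PySem.Str.isIn word t) <;>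
  cases h3 : (["review", "progress", "weak", "mistakes"]).any (fun word => PySem.Str.isIn word t) <;>
  cases h4 : (["problem", "question", "practice", "solve"]).any (fun word => PySem.Str.isIn word t) <;>
  rfl

-- ===== VERDICT (by name: the statement is the Claim_ definition above) =====
theorem llm_reason_spec : Claim_equal_llm_reason := by
  intro s _
  unfold Spec_llm_reason llm_reason llm_reason_alt
  exact llm_reason_core (PySem.Str.lower s)
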